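-- pv_equiv track=rewrite | github.com/schiob/TestingSistemas | ago-dic-2018/Max/Practica2Max.py | calc
-- ===== SOURCE A (Python) =====
-- def calc(N):
--     Pos = 0
--     Neg = 0
--     Par = 0
--     Impar = 0
--     lista = [] #cree esta lista vacia para guardar los valores y poder ver mas tarde
--     for num in N:
--         if num >= 0:
--             Pos= Pos + 1
--             if (num%2)== 0:
--                 Par= Par + 1
--             else:
--                 Impar= Impar + 1
--         else:
--             Neg= Neg + 1
--             if (num%2)== 0:
--                 Par= Par + 1
--             else:
--                 Impar= Impar + 1
--     return Pos, Neg, Par, Impar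
-- ===== SOURCE B (Python) =====
-- def calc(N):
--     # Staged passes: materialize once, then four independent filtered counts.
--     nums = list(N)
--     Pos = sum(1 for x in nums if x >= 0)
--     Neg = sum(1 for x in nums if x < 0)
--     Par = sum(1 for x in nums if x % 2 == 0)
--     Impar = sum(1 for x in nums if x % 2 != 0)
--     return Pos, Neg, Par, Impar
-- ===== Notes on version B (the rewrite author's own statement) =====
-- stated objective: alternative
-- what changed: B replaces A's single stateful loop with nested branches and four mutable counters by four independent filtered counting passes over a materialized list, each counter computed on its own.
import Mathlib
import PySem

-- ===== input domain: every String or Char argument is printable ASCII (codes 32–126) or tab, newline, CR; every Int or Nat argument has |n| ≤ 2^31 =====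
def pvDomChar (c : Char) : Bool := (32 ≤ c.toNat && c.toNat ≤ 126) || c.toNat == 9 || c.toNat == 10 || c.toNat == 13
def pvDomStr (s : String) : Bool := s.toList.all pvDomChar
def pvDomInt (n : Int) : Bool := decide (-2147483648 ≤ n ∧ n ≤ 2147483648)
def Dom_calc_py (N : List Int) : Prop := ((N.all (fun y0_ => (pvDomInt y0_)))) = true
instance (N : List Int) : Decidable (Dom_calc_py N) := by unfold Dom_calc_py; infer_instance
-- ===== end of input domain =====

-- B replaces A's single stateful loop (four counters, nested branches) by four
-- independent filtered counting passes; same asymptotics, different decomposition.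

-- ===== PORT A =====
-- loop body of A (nested branches, four counters)
def calcStepA (s : Int × Int × Int × Int) (num : Int) : Int × Int × Int × Int :=
  if num ≥ 0 then
    if PySem.Int.mod num 2 = 0 then (s.1 + 1, s.2.1, s.2.2.1 + 1, s.2.2.2)
    else (s.1 + 1, s.2.1, s.2.2.1, s.2.2.2 + 1)
  else
    if PySem.Int.mod num 2 = 0 then (s.1, s.2.1 + 1, s.2.2.1 + 1, s.2.2.2)
    else (s.1, s.2.1 + 1, s.2.2.1, s.2.2.2 + 1)

def calc_py (N : List Int) : Int × Int × Int × Int :=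
  N.foldl calcStepA (0, 0, 0, 0)

-- ===== PORT B =====
-- sum(1 for x in nums if p x)  ≡  count of elements satisfying p
def calcCount (nums : List Int) (p : Int → Bool) : Int :=
  ((nums.countP p : Nat) : Int)

def calc_py_alt (N : List Int) : Int × Int × Int × Int :=
  let nums := N
  (calcCount nums (fun x => x ≥ 0),
   calcCount nums (fun x => x < 0),
   calcCount nums (fun x => PySem.Int.mod x 2 = 0),
   calcCount nums (fun x => PySem.Int.mod x 2 ≠ 0))

-- ===== PRECONDITION & SPEC =====
def Spec_calc_py (N : List Int) (out : Int × Int × Int × Int) : Prop := out = calc_py_alt N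
instance (N : List Int) (out : Int × Int × Int × Int) : Decidable (Spec_calc_py N out) := by unfold Spec_calc_py; infer_instance

-- ===== CLAIM (what is proved, stated in full; the proofs are below) =====
def Claim_equal_calc_py : Prop := ∀ (N : List Int), Dom_calc_py N → Spec_calc_py N (calc_py N)

-- ===== LEMMAS AND PROOFS =====

-- unfolding one element of a filtered count, over Int
theorem calcCount_cons (x : Int) (xs : List Int) (p : Int → Bool) :
    calcCount (x :: xs) p = (if p x then 1 else 0) + calcCount xs p := by
  simp only [calcCount, List.countP_cons]
  split_ifs <;> simp <;> push_cast <;> ring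

-- A's fold from an arbitrary state adds B's four counts componentwise
theorem calc_fold_counts (N : List Int) (s : Int × Int × Int × Int) :
    N.foldl calcStepA s
    = (s.1 + calcCount N (fun x => x ≥ 0),
       s.2.1 + calcCount N (fun x => x < 0),
       s.2.2.1 + calcCount N (fun x => PySem.Int.mod x 2 = 0),
       s.2.2.2 + calcCount N (fun x => PySem.Int.mod x 2 ≠ 0)) := by
  induction N generalizing s with
  | nil => simp [calcCount]
  | cons x xs ih =>
    simp only [List.foldl_cons, calcCount_cons]
    rw [ih]
    by_cases hx : x ≥ 0 <;> by_cases hm : PySem.Int.mod x 2 = 0 <;>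
      simp only [calcStepA, hx, hm, if_true, if_false, decide_true, decide_false,
        ge_iff_le, not_le.mp, ne_eq, not_true, not_false_iff, ite_true, ite_false] <;>
      · have hx' := hx
        simp only [ge_iff_le] at hx'
        by_cases hlt : x < 0 <;> simp [hlt, hm] <;> omega

-- ===== VERDICT (by name: the statement is the Claim_ definition above) =====
theorem calc_py_spec : Claim_equal_calc_py := by
  intro N _
  unfold Spec_calc_py calc_py calc_py_alt
  rw [calc_fold_counts]
  simp
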